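-- pv_equiv track=rewrite | github.com/Boniface316/bigdata_vqa | src/bigdatavqa/vqe_utils/_helpers.py | Z_ij
-- ===== SOURCE A (Python) =====
-- def Z_i(i, length):
--     """
--     if index i is in the range 0, ..., length-1, the function returns the operator Z_i
--     else: the funtion returns the pauli string consisting of pauli I's only
--     length is the number of pauli operators tensorised
--     """
--     pauli_string = ""
--     for j in range(length):
--         if i == j:
--             pauli_string += "Z"
--         else:
--             pauli_string += "I"
--     return pauli_string
--
-- def Z_ij(i, j, length):
--     pauli_string = ""
--     if i == j:
--         pauli_string = Z_i(-1, length)  # return 'II...II'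
--     else:
--         for k in range(length):
--             if k == i or k == j:
--                 pauli_string += "Z"
--             else:
--                 pauli_string += "I"
--     return pauli_string
-- ===== SOURCE B (Python) =====
-- def Z_ij(i, j, length):
--     chars = ["I"] * max(length, 0)
--     if i != j:
--         for idx in (i, j):
--             if 0 <= idx < length:
--                 chars[idx] = "Z"
--     return "".join(chars)
-- ===== Notes on version B (the rewrite author's own statement) =====
-- stated objective: faster
-- what changed: Replaces the per-position scan with an equality test and string += at every index by allocating an all-'I' list once and directly writing 'Z' at the two in-range target indices, then joining.
import Mathlib
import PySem

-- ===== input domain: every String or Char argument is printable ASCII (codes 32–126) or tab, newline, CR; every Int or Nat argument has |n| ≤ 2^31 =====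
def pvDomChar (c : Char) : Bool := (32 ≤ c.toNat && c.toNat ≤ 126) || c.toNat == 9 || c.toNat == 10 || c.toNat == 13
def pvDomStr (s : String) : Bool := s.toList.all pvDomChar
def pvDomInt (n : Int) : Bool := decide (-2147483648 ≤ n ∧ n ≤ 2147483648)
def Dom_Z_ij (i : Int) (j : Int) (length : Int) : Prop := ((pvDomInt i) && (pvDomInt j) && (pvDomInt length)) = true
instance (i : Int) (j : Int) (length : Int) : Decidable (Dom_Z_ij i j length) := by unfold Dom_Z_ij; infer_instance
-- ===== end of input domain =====

-- ===== PORT A =====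
-- B differs only in construction strategy: prefilled list with two indexed writes instead of a scan.
-- Python string += of one-char literals is ported as appending to a List Char, String.mk at the end (exact on ASCII).
def Z_i (i : Int) (length : Int) : String :=
  String.mk ((PySem.List.pyRange 0 length 1).foldl
    (fun acc j => acc ++ (if i == j then ['Z'] else ['I'])) [])

def Z_ij (i : Int) (j : Int) (length : Int) : String :=
  if i == j then Z_i (-1) length
  else String.mk ((PySem.List.pyRange 0 length 1).foldl
    (fun acc k => acc ++ (if k == i || k == j then ['Z'] else ['I'])) [])

-- ===== PORT B =====
-- chars[idx] = "Z" guarded by 0 <= idx < length: in-range write, ported as List.set (idx.toNat safe under the guard)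
def pvPlace (chars : List Char) (idx : Int) (length : Int) : List Char :=
  if 0 ≤ idx ∧ idx < length then chars.set idx.toNat 'Z' else chars

def Z_ij_alt (i : Int) (j : Int) (length : Int) : String :=
  let chars := List.replicate (max length 0).toNat 'I'
  String.mk (if i ≠ j then pvPlace (pvPlace chars i length) j length else chars)

def Spec_Z_ij (i : Int) (j : Int) (length : Int) (out : String) : Prop := out = Z_ij_alt i j length
instance (i : Int) (j : Int) (length : Int) (out : String) : Decidable (Spec_Z_ij i j length out) := by unfold Spec_Z_ij; infer_instance

-- ===== CLAIM (what is proved, stated in full; the proofs are below) =====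
def Claim_equal_Z_ij : Prop := ∀ (i : Int) (j : Int) (length : Int), Dom_Z_ij i j length → Spec_Z_ij i j length (Z_ij i j length)

-- ===== LEMMAS AND PROOFS =====

theorem pv_foldl_append_ZI (f : Int → Bool) :
    ∀ (l : List Int) (acc : List Char),
      l.foldl (fun acc k => acc ++ (if f k then ['Z'] else ['I'])) acc =
        acc ++ l.map (fun k => if f k then 'Z' else 'I') := by
  intro l
  induction l with
  | nil => simp
  | cons x xs ih =>
    intro acc
    simp only [List.foldl, List.map, ih]
    split_ifs <;> simp

theorem pv_toNat_max (length : Int) : (max length 0).toNat = length.toNat := by omega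

theorem pv_main (i j length : Int) : Z_ij i j length = Z_ij_alt i j length := by
  by_cases hij : i = j
  · subst hij
    simp only [Z_ij, Z_i, Z_ij_alt, beq_self_eq_true, if_pos, ne_eq, not_true_eq_false,
      if_false, pv_toNat_max]
    rw [pv_foldl_append_ZI (fun k => (-1 : Int) == k), List.nil_append]
    congr 1
    apply List.ext_getElem
    · simp [PySem.List.length_pyRange_one]
    · intro n h1 h2
      rw [List.getElem_map, PySem.List.getElem_pyRange_one, List.getElem_replicate]
      rw [if_neg]
      simp only [beq_iff_eq]
      omega
  · have hij' : (i == j) = false := by simp [hij]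
    simp only [Z_ij, hij', Bool.false_eq_true, if_false, Z_ij_alt, ne_eq, hij,
      not_false_eq_true, if_pos, pv_toNat_max]
    rw [pv_foldl_append_ZI (fun k => k == i || k == j), List.nil_append]
    congr 1
    apply List.ext_getElem
    · simp [PySem.List.length_pyRange_one, pvPlace]
      split_ifs <;> simp
    · intro n h1 h2
      rw [List.getElem_map, PySem.List.getElem_pyRange_one]
      simp only [pvPlace, zero_add, beq_iff_eq, Bool.or_eq_true]
      have hn : n < length.toNat := by
        simpa [PySem.List.length_pyRange_one] using h1
      split_ifs <;>
        simp_all [List.getElem_set, List.getElem_replicate] <;>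
        first
        | omega
        | (split_ifs <;> first | rfl | omega)

-- ===== VERDICT (by name: the statement is the Claim_ definition above) =====
theorem Z_ij_spec : Claim_equal_Z_ij := by
  intro i j length _
  unfold Spec_Z_ij
  exact pv_main i j length
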